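-- pv_equiv track=rewrite | github.com/soumyadsanyal/codility | frog_river_one.py | solution
-- ===== SOURCE A (Python) =====
-- def solution(X, A):
--     # write your code in Python 2.7
--     positions={}
--     index=0
--     while index<len(A):
--         if A[index] not in positions:
--             positions[A[index]]=1
--         if len(positions)==X:
--             return index
--         index+=1
--     return -1
-- ===== SOURCE B (Python) =====
-- def solution(X, A):
--     firsts = {}
--     for i, v in enumerate(A):
--         if v not in firsts:
--             firsts[v] = i
--     vals = sorted(firsts.values())
--     if X < 1 or len(vals) < X:
--         return -1
--     return vals[X - 1]
-- ===== Notes on version B (the rewrite author's own statement) =====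
-- stated objective: alternative
-- what changed: Instead of A's scan that grows a seen-dict and checks its size after every element, B builds a first-occurrence-index dict in one full pass and then selects the X-th smallest first-occurrence index (sorted(firsts.values())[X-1]), returning -1 when X < 1 or fewer than X distinct values exist.
import Mathlib
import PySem

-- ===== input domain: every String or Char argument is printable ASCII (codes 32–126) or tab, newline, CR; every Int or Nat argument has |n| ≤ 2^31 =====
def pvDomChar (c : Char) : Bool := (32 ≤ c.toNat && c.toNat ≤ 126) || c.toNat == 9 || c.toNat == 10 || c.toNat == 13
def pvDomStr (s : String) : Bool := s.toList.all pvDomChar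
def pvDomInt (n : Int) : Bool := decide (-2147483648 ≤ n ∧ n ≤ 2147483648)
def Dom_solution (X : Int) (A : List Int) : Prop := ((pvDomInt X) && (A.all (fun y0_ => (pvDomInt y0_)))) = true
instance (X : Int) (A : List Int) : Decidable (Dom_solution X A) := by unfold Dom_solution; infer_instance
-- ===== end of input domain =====

-- B replaces A's check-after-every-element scan by one full pass recording each value's
-- first-occurrence index, then selects the X-th smallest such index (objective: alternative).

-- ===== PORT A =====
-- while index < len(A): if A[index] not in positions: positions[A[index]] = 1;
--                       if len(positions) == X: return index; index += 1
def solutionLoop (X : Int) (rest : List Int) (positions : PySem.Dict Int Int) (index : Int) : Int :=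
  match rest with
  | [] => -1
  | a :: rest' =>
    let positions' := if positions.contains a then positions else positions.insert a 1
    if (positions'.size : Int) = X then index
    else solutionLoop X rest' positions' (index + 1)

def solution (X : Int) (A : List Int) : Int :=
  solutionLoop X A PySem.Dict.empty 0

-- ===== PORT B =====
-- for i, v in enumerate(A): if v not in firsts: firsts[v] = i
def buildFirsts (rest : List Int) (idx : Int) (d : PySem.Dict Int Int) : PySem.Dict Int Int :=
  match rest with
  | [] => d
  | v :: rest' => buildFirsts rest' (idx + 1) (if d.contains v then d else d.insert v idx)

def solution_alt (X : Int) (A : List Int) : Int :=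
  let vals := PySem.List.sorted ((buildFirsts A 0 PySem.Dict.empty).values) (fun x => x) false
  if X < 1 ∨ PySem.List.len vals < X then -1
  else ((PySem.List.pyGet? vals (X - 1)).getD 0)  -- the guard keeps X-1 in range, so getD's default is unreachable

-- ===== PRECONDITION & SPEC =====
def Spec_solution (X : Int) (A : List Int) (out : Int) : Prop := out = solution_alt X A
instance (X : Int) (A : List Int) (out : Int) : Decidable (Spec_solution X A out) := by unfold Spec_solution; infer_instance

-- ===== CLAIM (what is proved, stated in full; the proofs are below) =====
def Claim_equal_solution : Prop := ∀ (X : Int) (A : List Int), Dom_solution X A → Spec_solution X A (solution X A)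

-- ===== LEMMAS AND PROOFS =====

-- the list of indices at which a value not yet seen first appears, scanning rest from idx
def newFirsts (seen : List Int) (rest : List Int) (idx : Int) : List Int :=
  match rest with
  | [] => []
  | a :: rest' =>
    if a ∈ seen then newFirsts seen rest' (idx + 1)
    else idx :: newFirsts (a :: seen) rest' (idx + 1)

theorem newFirsts_congr : ∀ (rest : List Int) (seen seen' : List Int) (idx : Int),
    (∀ x, x ∈ seen ↔ x ∈ seen') → newFirsts seen rest idx = newFirsts seen' rest idx := by
  intro rest
  induction rest with
  | nil => intro _ _ _ _; rfl
  | cons a rest' ih =>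
    intro seen seen' idx h
    simp only [newFirsts]
    by_cases ha : a ∈ seen
    · rw [if_pos ha, if_pos ((h a).mp ha), ih _ _ _ h]
    · rw [if_neg ha, if_neg (fun hc => ha ((h a).mpr hc))]
      congr 1
      exact ih _ _ _ (by intro x; simp [h x])

theorem newFirsts_lb : ∀ (rest seen : List Int) (idx x : Int),
    x ∈ newFirsts seen rest idx → idx ≤ x := by
  intro rest
  induction rest with
  | nil => intro _ _ _ h; simp [newFirsts] at h
  | cons a rest' ih =>
    intro seen idx x h
    simp only [newFirsts] at h
    by_cases ha : a ∈ seen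
    · rw [if_pos ha] at h; have := ih _ _ _ h; omega
    · rw [if_neg ha] at h
      rcases List.mem_cons.mp h with h | h
      · omega
      · have := ih _ _ _ h; omega

theorem newFirsts_pairwise : ∀ (rest seen : List Int) (idx : Int),
    (newFirsts seen rest idx).Pairwise (· < ·) := by
  intro rest
  induction rest with
  | nil => intro _ _; simp [newFirsts]
  | cons a rest' ih =>
    intro seen idx
    simp only [newFirsts]
    by_cases ha : a ∈ seen
    · rw [if_pos ha]; exact ih _ _
    · rw [if_neg ha]
      refine List.pairwise_cons.mpr ⟨?_, ih _ _⟩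
      intro x hx
      have := newFirsts_lb _ _ _ _ hx; omega

theorem values_buildFirsts : ∀ (rest : List Int) (d : PySem.Dict Int Int) (idx : Int),
    (buildFirsts rest idx d).values = d.values ++ newFirsts d.keys rest idx := by
  intro rest
  induction rest with
  | nil => intro d idx; simp [buildFirsts, newFirsts]
  | cons v rest' ih =>
    intro d idx
    simp only [buildFirsts, newFirsts]
    by_cases hc : d.contains v = true
    · rw [if_pos hc, if_pos ((PySem.Dict.contains_iff_mem_keys d v).mp hc), ih]
    · have hcf : d.contains v = false := by simpa using hc
      have hv : ¬ v ∈ d.keys := fun hm => hc ((PySem.Dict.contains_iff_mem_keys d v).mpr hm)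
      rw [if_neg (by simp [hcf]), if_neg hv, ih]
      have hkeys : (d.insert v idx).keys = d.keys ++ [v] :=
        PySem.Dict.keys_insert_of_not_contains d idx hcf
      have hvals : (d.insert v idx).values = d.values ++ [idx] := by
        simp only [PySem.Dict.values, PySem.Dict.items_insert_of_not_contains d idx hcf,
          List.map_append]
        rfl
      rw [hvals, hkeys,
        newFirsts_congr rest' (d.keys ++ [v]) (v :: d.keys) (idx + 1) (by intro x; simp [or_comm])]
      simp

-- A's loop, when X exceeds the current dict size by 1 + k, returns the k-th new-first index
theorem solutionLoop_eq : ∀ (rest : List Int) (d : PySem.Dict Int Int) (idx : Int) (k : Nat) (X : Int),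
    X = (d.size : Int) + 1 + (k : Int) →
    solutionLoop X rest d idx =
      (match (newFirsts d.keys rest idx)[k]? with
       | some v => v
       | none => -1) := by
  intro rest
  induction rest with
  | nil => intro d idx k X _; simp [solutionLoop, newFirsts]
  | cons a rest' ih =>
    intro d idx k X hX
    simp only [solutionLoop, newFirsts]
    by_cases hc : d.contains a = true
    · rw [if_pos hc, if_pos ((PySem.Dict.contains_iff_mem_keys d a).mp hc),
        if_neg (by omega), ih _ _ k X hX]
    · have hcf : d.contains a = false := by simpa using hc
      have ha : ¬ a ∈ d.keys := fun hm => hc ((PySem.Dict.contains_iff_mem_keys d a).mpr hm)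
      rw [if_neg hc, if_neg ha]
      have hsize : (d.insert a 1).size = d.size + 1 := by
        rw [PySem.Dict.size_insert]; simp [hcf]
      have hkeys : (d.insert a 1).keys = d.keys ++ [a] :=
        PySem.Dict.keys_insert_of_not_contains d 1 hcf
      cases k with
      | zero =>
        have heq : (((d.insert a 1).size : Nat) : Int) = X := by rw [hsize]; push_cast; omega
        rw [if_pos heq]
        simp
      | succ k' =>
        have hne : ¬ (((d.insert a 1).size : Nat) : Int) = X := by
          rw [hsize]; push_cast; push_cast at hX; omega
        rw [if_neg hne]
        rw [ih _ _ k' X (by rw [hsize]; push_cast; push_cast at hX; omega)]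
        rw [hkeys,
          newFirsts_congr rest' (d.keys ++ [a]) (a :: d.keys) (idx + 1) (by intro x; simp [or_comm])]
        simp

-- A's loop returns -1 once X is below the dict size (the size never decreases)
theorem solutionLoop_lt : ∀ (rest : List Int) (d : PySem.Dict Int Int) (idx X : Int),
    X < (d.size : Int) → solutionLoop X rest d idx = -1 := by
  intro rest
  induction rest with
  | nil => intro _ _ _ _; rfl
  | cons a rest' ih =>
    intro d idx X hX
    simp only [solutionLoop]
    by_cases hc : d.contains a = true
    · rw [if_pos hc, if_neg (by omega)]
      exact ih _ _ _ hX
    · have hcf : d.contains a = false := by simpa using hc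
      have hsize : (d.insert a 1).size = d.size + 1 := by
        rw [PySem.Dict.size_insert]; simp [hcf]
      have hne : ¬ (((d.insert a 1).size : Nat) : Int) = X := by rw [hsize]; push_cast; omega
      rw [if_neg hc, if_neg hne]
      exact ih _ _ _ (by rw [hsize]; push_cast; omega)

theorem sorted_vals (A : List Int) :
    PySem.List.sorted ((buildFirsts A 0 PySem.Dict.empty).values) (fun x => x) false
      = newFirsts [] A 0 := by
  rw [values_buildFirsts]
  have hv : (PySem.Dict.empty : PySem.Dict Int Int).values = [] := rfl
  rw [hv, PySem.Dict.keys_empty, List.nil_append]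
  exact PySem.List.sorted_eq_of_perm_of_pairwise_lt _ _ _ (List.Perm.refl _)
    (newFirsts_pairwise A [] 0)

-- ===== VERDICT (by name: the statement is the Claim_ definition above) =====
theorem solution_spec : Claim_equal_solution := by
  intro X A _
  unfold Spec_solution solution solution_alt
  rw [sorted_vals]
  by_cases hX : X < 1
  · rw [if_pos (Or.inl hX)]
    cases A with
    | nil => rfl
    | cons a rest =>
      have hc : (PySem.Dict.empty : PySem.Dict Int Int).contains a = false := by rfl
      have hs : ((PySem.Dict.empty : PySem.Dict Int Int).insert a 1).size = 1 := by
        rw [PySem.Dict.size_insert]; simp [hc]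
      simp only [solutionLoop]
      have hcn : ¬ ((PySem.Dict.empty : PySem.Dict Int Int).contains a = true) := by simp [hc]
      have hne : ¬ ((((PySem.Dict.empty : PySem.Dict Int Int).insert a 1).size : Nat) : Int) = X := by
        rw [hs]; push_cast; omega
      rw [if_neg hcn, if_neg hne]
      exact solutionLoop_lt rest _ 1 X (by rw [hs]; push_cast; omega)
  · have hkey : X = ((PySem.Dict.empty : PySem.Dict Int Int).size : Int) + 1 + ((X - 1).toNat : Int) := by
      rw [PySem.Dict.size_empty]; omega
    rw [solutionLoop_eq A PySem.Dict.empty 0 (X - 1).toNat X hkey, PySem.Dict.keys_empty]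
    by_cases hlen : PySem.List.len (newFirsts [] A 0) < X
    · rw [if_pos (Or.inr hlen)]
      have hnone : (newFirsts [] A 0)[(X - 1).toNat]? = none := by
        apply List.getElem?_eq_none
        rw [PySem.List.len_eq] at hlen; omega
      rw [hnone]
    · rw [if_neg (by tauto)]
      have hlt : (X - 1).toNat < (newFirsts [] A 0).length := by
        rw [PySem.List.len_eq] at hlen; omega
      have hsome : (newFirsts [] A 0)[(X - 1).toNat]? = some (newFirsts [] A 0)[(X - 1).toNat] :=
        List.getElem?_eq_getElem hlt
      have hget : PySem.List.pyGet? (newFirsts [] A 0) (X - 1)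
          = some (newFirsts [] A 0)[(X - 1).toNat] :=
        PySem.List.pyGet?_eq_some_getElem (newFirsts [] A 0) (by omega)
          (by omega)
      rw [hsome, hget]
      rfl
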